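-- pv_equiv track=rewrite | github.com/sue-zadeh/python-test | mock t1-new.py | solution
-- ===== SOURCE A (Python) =====
-- def solution(numbers):
--    result = []
--    for num in numbers:
--       lastdigit = num % 10
--       firstdigit = num // 10
--       newnum = (firstdigit * 10)+(lastdigit+2) # any number length
--       # newnum = (firstdigit)+(lastdigit+2) #if just 2 digit
--       result.append(newnum)
--    return result
-- ===== SOURCE B (Python) =====
-- def solution(numbers):
--     # Each element just gains 2, since (n//10)*10 + n%10 == n.
--     # Divide and conquer: split the list in half, transform each half, concatenate.
--     if len(numbers) <= 1:
--         return [numbers[0] + 2] if numbers else []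
--     mid = len(numbers) // 2
--     return solution(numbers[:mid]) + solution(numbers[mid:])
-- ===== Notes on version B (the rewrite author's own statement) =====
-- stated objective: alternative
-- what changed: Replaced the iterative digit-splitting append loop with a divide-and-conquer recursion: split the list at the midpoint, recursively transform the halves (each element is just num+2 because (n//10)*10 + n%10 == n), and concatenate.
import Mathlib
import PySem

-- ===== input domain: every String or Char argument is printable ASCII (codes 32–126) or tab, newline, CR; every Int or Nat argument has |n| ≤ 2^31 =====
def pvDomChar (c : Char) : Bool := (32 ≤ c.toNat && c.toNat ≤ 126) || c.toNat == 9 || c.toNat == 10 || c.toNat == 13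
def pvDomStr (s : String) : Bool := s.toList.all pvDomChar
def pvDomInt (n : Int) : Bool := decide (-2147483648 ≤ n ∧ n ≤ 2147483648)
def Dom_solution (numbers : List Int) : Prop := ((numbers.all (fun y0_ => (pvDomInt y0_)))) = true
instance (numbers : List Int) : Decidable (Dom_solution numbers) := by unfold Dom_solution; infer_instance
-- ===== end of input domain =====

-- B replaces A's iterative digit-split/append loop with a divide-and-conquer recursion:
-- split at the midpoint, transform each half (each element gains 2, since (n//10)*10 + n%10 = n), concatenate.

-- ===== PORT A =====
def solution (numbers : List Int) : List Int :=
  numbers.foldl (fun result num =>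
    let lastdigit := PySem.Int.mod num 10
    let firstdigit := PySem.Int.floordiv num 10
    let newnum := (firstdigit * 10) + (lastdigit + 2)
    result ++ [newnum]) []

-- ===== PORT B =====
-- used by the port's termination proof: len // 2 as a Nat division
theorem mid_eq (n : Nat) : PySem.Int.floordiv (n : Int) 2 = ((n / 2 : Nat) : Int) := by
  exact_mod_cast PySem.Int.floordiv_natCast n 2

def solution_alt (numbers : List Int) : List Int :=
  if numbers.length ≤ 1 then
    match numbers with
    | [] => []
    | n :: _ => [n + 2]
  else
    let mid : Int := PySem.Int.floordiv (numbers.length : Int) 2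
    solution_alt (PySem.List.slice numbers none (some mid)) ++
      solution_alt (PySem.List.slice numbers (some mid) none)
termination_by numbers.length
decreasing_by
  all_goals
    simp only [mid_eq, PySem.List.slice_to_natCast, PySem.List.slice_from_natCast,
      List.length_take, List.length_drop]
    omega

-- ===== PRECONDITION & SPEC =====
def Spec_solution (numbers : List Int) (out : List Int) : Prop := out = solution_alt numbers
instance (numbers : List Int) (out : List Int) : Decidable (Spec_solution numbers out) := by unfold Spec_solution; infer_instance

-- ===== CLAIM =====
def Claim_equal_solution : Prop := ∀ (numbers : List Int), Dom_solution numbers → Spec_solution numbers (solution numbers)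

-- ===== LEMMAS AND PROOFS =====
theorem solution_alt_eq_map (numbers : List Int) :
    solution_alt numbers = numbers.map (fun n => n + 2) := by
  induction numbers using solution_alt.induct with
  | case1 h => simp [solution_alt]
  | case2 n t h =>
      have ht : t = [] := by simpa using h
      subst ht
      simp [solution_alt]
  | case3 xs h mid ih2 ih1 =>
      rw [solution_alt.eq_def]
      simp only [if_neg h]
      rw [ih2, ih1, ← List.map_append]
      have hm : mid = ((xs.length / 2 : Nat) : Int) := mid_eq xs.length
      rw [hm, PySem.List.slice_to_natCast, PySem.List.slice_from_natCast,
        List.take_append_drop]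

theorem solution_foldl (numbers acc : List Int) :
    numbers.foldl (fun result num =>
      (result ++ [(PySem.Int.floordiv num 10) * 10 + (PySem.Int.mod num 10 + 2)])) acc
      = acc ++ numbers.map (fun n => n + 2) := by
  induction numbers generalizing acc with
  | nil => simp
  | cons x xs ih =>
      rw [List.foldl_cons, ih]
      simp
      omega

theorem solution_eq (numbers : List Int) : solution numbers = solution_alt numbers := by
  unfold solution
  rw [solution_alt_eq_map]
  simpa using solution_foldl numbers []

-- ===== VERDICT =====
theorem solution_spec : Claim_equal_solution := by
  intro numbers _
  exact solution_eq numbers
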